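-- pv_equiv track=rewrite | github.com/jbachurski/cpp-algorithmics-delta | AlgorithmicsSet/~USACO/Cow Evolution/evolution.py | build
-- ===== SOURCE A (Python) =====
-- import functools
--
-- def build(F):
--     if not F or F == [set()]:
--         return set()
--     all_union = functools.reduce(lambda a, b: a | b, F, set())
--     for split in all_union:
--         F_with = [f for f in F if split in f]
--         F_without = [f for f in F if split not in f]
--         a, b = build([f - {split} for f in F_with]), build(F_without)
--         if a is not None and b is not None and not (a & b):
--             return a | b | {split}
--     else:
--         return None
-- ===== SOURCE B (Python) =====
-- def build(F):
--     # Phase 1: duplicate rows (as sets) make a tree impossible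
--     seen = []
--     for f in F:
--         if f in seen:
--             return None
--         seen.append(f)
--     # Phase 2: laminar-family test on the rows containing each characteristic
--     chars = []
--     for f in F:
--         for c in f:
--             if c not in chars:
--                 chars.append(c)
--     for c in chars:
--         for d in chars:
--             c_in_d = all(d in f for f in F if c in f)   # rows(c) subset rows(d)
--             d_in_c = all(c in f for f in F if d in f)
--             disjoint = not any(c in f and d in f for f in F)
--             if not (c_in_d or d_in_c or disjoint):
--                 return None
--     # Phase 3: valid family -- iterative post-order emission with an explicit stack
--     out = []
--     stack = [("fam", F)]
--     while stack:
--         kind, v = stack.pop()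
--         if kind == "chr":
--             out.append(v)
--             continue
--         G = v
--         if not G or G == [set()]:
--             continue
--         gchars = []
--         for f in G:
--             for c in f:
--                 if c not in gchars:
--                     gchars.append(c)
--         split = None
--         for c in gchars:
--             if all(all(c in f for f in G if d in f) or not all(d in f for f in G if c in f)
--                    for d in gchars):
--                 split = c
--                 break
--         if split is None:
--             continue
--         g1 = [f - {split} for f in G if split in f]
--         g2 = [f for f in G if split not in f]
--         stack.append(("chr", split))
--         stack.append(("fam", g2))
--         stack.append(("fam", g1))
--     return set(out)
-- ===== Notes on version B (the rewrite author's own statement) =====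
-- stated objective: alternative
-- what changed: A decides validity by backtracking recursive search, exponential in the number of characteristics (for every candidate split it rebuilds both halves and tests the outcome); B is non-recursive: it first runs a direct polynomial laminar-family validity test (rows pairwise distinct, every two characteristics' row-sets nested or disjoint) and then emits the characteristics with a single explicit-stack worklist loop that picks one maximal split per node and never backtracks.
import Mathlib
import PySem

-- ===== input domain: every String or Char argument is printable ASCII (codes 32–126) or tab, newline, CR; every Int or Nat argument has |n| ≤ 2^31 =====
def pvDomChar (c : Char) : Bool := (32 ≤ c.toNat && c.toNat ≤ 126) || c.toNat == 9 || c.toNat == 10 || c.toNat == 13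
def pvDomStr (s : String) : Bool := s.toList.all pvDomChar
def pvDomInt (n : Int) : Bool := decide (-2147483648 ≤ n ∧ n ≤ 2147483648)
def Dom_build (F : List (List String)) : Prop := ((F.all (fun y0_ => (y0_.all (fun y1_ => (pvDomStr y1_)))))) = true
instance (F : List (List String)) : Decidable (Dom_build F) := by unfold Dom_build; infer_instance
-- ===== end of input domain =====

-- B replaces A's backtracking recursive search by a polynomial laminar-family validity test
-- plus one explicit-stack worklist loop that emits the characteristics without recursion (alternative algorithm).


-- ===== PORT A =====
-- termination measure for A's recursion (total number of characteristics plus number of rows)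
def pvMeasure (F : List (List String)) : Nat := (F.map List.length).sum + F.length

theorem pv_mem_unionAll {F : List (List String)} {x : String} {init : List String}
    (h : x ∈ F.foldl (fun a f => PySem.Set.union a f) init) : x ∈ init ∨ ∃ f ∈ F, x ∈ f := by
  induction F generalizing init with
  | nil => exact Or.inl h
  | cons f rest ih =>
    rcases ih h with h' | ⟨g, hg, hx⟩
    · rcases (PySem.Set.mem_union _ _ _).1 h' with h'' | h''
      · exact Or.inl h''
      · exact Or.inr ⟨f, by simp, h''⟩
    · exact Or.inr ⟨g, by simp [hg], hx⟩

theorem pv_notmem {g : List String} {c : String} (hf : ¬ g.contains c = true) : c ∉ g :=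
  fun h => hf ((List.contains_iff_mem).2 h)

theorem pvMeasure_strip_le (c : String) : ∀ (F : List (List String)),
    pvMeasure ((F.filter (fun f => f.contains c)).map (fun f => PySem.Set.diff f [c])) ≤ pvMeasure F := by
  intro F
  induction F with
  | nil => simp [pvMeasure]
  | cons f rest ih =>
    by_cases hf : f.contains c
    · have hd : (PySem.Set.diff f [c]).length ≤ f.length := List.length_filter_le _ _
      simp only [pvMeasure, List.filter_cons, hf, if_true, List.map_cons, List.sum_cons, List.length_cons] at *
      omega
    · simp only [pvMeasure, List.filter_cons, hf, Bool.false_eq_true, if_false, List.map_cons, List.sum_cons, List.length_cons] at *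
      omega

theorem pvMeasure_strip_lt (F : List (List String)) (c : String) (h : ∃ f ∈ F, c ∈ f) :
    pvMeasure ((F.filter (fun f => f.contains c)).map (fun f => PySem.Set.diff f [c])) < pvMeasure F := by
  induction F with
  | nil => simp at h
  | cons f rest ih =>
    rcases h with ⟨g, hg, hc⟩
    simp only [List.mem_cons] at hg
    by_cases hf : f.contains c
    · have hcf : c ∈ f := (List.contains_iff_mem).1 hf
      have hd : (PySem.Set.diff f [c]).length < f.length := by
        apply List.length_filter_lt_length_iff_exists.2
        exact ⟨c, hcf, by simp⟩
      have hle := pvMeasure_strip_le c rest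
      simp only [pvMeasure, List.filter_cons, hf, if_true, List.map_cons, List.sum_cons, List.length_cons] at *
      omega
    · have h' : ∃ g ∈ rest, c ∈ g := by
        rcases hg with rfl | hg
        · exact absurd hc (pv_notmem hf)
        · exact ⟨g, hg, hc⟩
      have := ih h'
      simp only [pvMeasure, List.filter_cons, hf, Bool.false_eq_true, if_false, List.map_cons, List.sum_cons, List.length_cons] at *
      omega

theorem pvMeasure_without_le (c : String) : ∀ (F : List (List String)),
    pvMeasure (F.filter (fun f => !f.contains c)) ≤ pvMeasure F := by
  intro F
  induction F with
  | nil => simp [pvMeasure]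
  | cons f rest ih =>
    by_cases hf : f.contains c
    · simp only [pvMeasure, List.filter_cons, hf, Bool.not_true, Bool.false_eq_true, if_false,
        List.map_cons, List.sum_cons, List.length_cons] at *
      omega
    · simp only [pvMeasure, List.filter_cons, hf, Bool.not_false, if_true, List.map_cons,
        List.sum_cons, List.length_cons] at *
      omega

theorem pvMeasure_without_lt (F : List (List String)) (c : String) (h : ∃ f ∈ F, c ∈ f) :
    pvMeasure (F.filter (fun f => !f.contains c)) < pvMeasure F := by
  induction F with
  | nil => simp at h
  | cons f rest ih =>
    rcases h with ⟨g, hg, hc⟩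
    simp only [List.mem_cons] at hg
    by_cases hf : f.contains c
    · have hle := pvMeasure_without_le c rest
      simp only [pvMeasure, List.filter_cons, hf, Bool.not_true, Bool.false_eq_true, if_false,
        List.map_cons, List.sum_cons, List.length_cons] at *
      omega
    · have h' : ∃ g ∈ rest, c ∈ g := by
        rcases hg with rfl | hg
        · exact absurd hc (pv_notmem hf)
        · exact ⟨g, hg, hc⟩
      have := ih h'
      have hb : (!f.contains c) = true := by cases h : f.contains c <;> simp_all
      simp only [pvMeasure, List.filter_cons, hb, if_true, List.map_cons, List.sum_cons, List.length_cons] at *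
      omega

-- port of A: backtracking search over every characteristic of the union
def build (F : List (List String)) : Option (List String) :=
  if F = [] ∨ F = [[]] then some [] else
    (F.foldl (fun a f => PySem.Set.union a f) []).attach.findSome? (fun sp =>
      let Fwith := F.filter (fun f => f.contains sp.val)
      let a := build (Fwith.map (fun f => PySem.Set.diff f [sp.val]))
      let b := build (F.filter (fun f => !f.contains sp.val))
      match a, b with
      | some av, some bv =>
          if PySem.Set.inter av bv = [] then
            some (PySem.Set.add (PySem.Set.union av bv) sp.val)
          else none
      | _, _ => none)
termination_by pvMeasure F
decreasing_by
  · try simp only [List.map_subtype, List.unattach_filter, List.unattach_attach]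
    exact pvMeasure_strip_lt F sp.val ((pv_mem_unionAll sp.property).resolve_left (by simp))
  · try simp only [List.map_subtype, List.unattach_filter, List.unattach_attach]
    exact pvMeasure_without_lt F sp.val ((pv_mem_unionAll sp.property).resolve_left (by simp))

-- ===== PORT B =====
-- B is non-recursive: phase 1 duplicate-row scan, phase 2 pairwise laminar test,
-- phase 3 one worklist loop over an explicit stack of tasks (fuel makes the while-loop total;
-- 3*size+1 is an upper bound on the number of loop iterations, proved below).

-- a worklist task: a sub-family still to decompose, or a characteristic ready to emit
inductive PvTask : Type
  | fam : List (List String) → PvTask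
  | chr : String → PvTask
deriving DecidableEq, Repr

-- total size of a family (rows plus the lengths of all rows), accumulator style
def pvSize (F : List (List String)) : Nat := F.foldl (fun a f => a + f.length + 1) 0

-- the distinct characteristics, first occurrence first
def pvChars (F : List (List String)) : List String := PySem.Set.ofList (F.flatMap (fun f => f))

-- c is maximal: every characteristic whose row-set contains c's row-set already has c's rows
def pvIsMax (F : List (List String)) (c : String) : Bool :=
  (pvChars F).all (fun d =>
    ((F.filter (fun f => f.contains d)).all (fun f => f.contains c))
      || !((F.filter (fun f => f.contains c)).all (fun f => f.contains d)))

-- duplicate-row scan ('if f in seen' over the prefix)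
def pvRowDup : List (List String) → List (List String) → Bool
  | [], _ => false
  | f :: rest, seen =>
      if seen.any (fun g => PySem.Set.equal f g) then true else pvRowDup rest (f :: seen)

-- pairwise nested-or-disjoint test over the characteristics
def pvLaminarOk (F : List (List String)) (chars : List String) : Bool :=
  chars.all (fun c => chars.all (fun d =>
    ((F.filter (fun f => f.contains c)).all (fun f => f.contains d)
      || (F.filter (fun f => f.contains d)).all (fun f => f.contains c))
    || !(F.any (fun f => f.contains c && f.contains d))))

-- the worklist loop: pop a task; a characteristic is appended to the output, a family is
-- either base (nothing to do) or split at its first maximal characteristic, pushing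
-- the inner part, the outer part and the characteristic itself
def pvRun : Nat → List PvTask → List String → List String
  | 0, _, acc => acc.reverse
  | Nat.succ _, [], acc => acc.reverse
  | Nat.succ n, PvTask.chr c :: st, acc => pvRun n st (c :: acc)
  | Nat.succ n, PvTask.fam G :: st, acc =>
      if G = [] ∨ G = [[]] then pvRun n st acc
      else
        match (pvChars G).find? (pvIsMax G) with
        | none => pvRun n st acc
        | some c =>
            pvRun n
              (PvTask.fam (G.filterMap (fun f =>
                  if f.contains c then some (f.filter (fun x => x != c)) else none))
                :: PvTask.fam (G.filter (fun f => !f.contains c))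
                :: PvTask.chr c :: st) acc

def build_alt (F : List (List String)) : Option (List String) :=
  if pvRowDup F [] then none
  else if pvLaminarOk F (pvChars F) then
    some (PySem.Set.ofList (pvRun (3 * pvSize F + 1) [PvTask.fam F] []))
  else none

-- ===== PRECONDITION & SPEC =====
def Spec_build (F : List (List String)) (out : Option (List String)) : Prop := out = build_alt F
instance (F : List (List String)) (out : Option (List String)) : Decidable (Spec_build F out) := by unfold Spec_build; infer_instance

-- ===== CLAIM (what is proved, stated in full; the proofs are below) =====
def Claim_equal_build : Prop := ∀ (F : List (List String)), Dom_build F → Spec_build F (build F)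

-- ===== LEMMAS AND PROOFS =====

-- abbreviations for the two recursive sub-families and the union of all rows
def pvG1 (F : List (List String)) (c : String) : List (List String) :=
  (F.filter (fun f => f.contains c)).map (fun f => PySem.Set.diff f [c])
def pvG2 (F : List (List String)) (c : String) : List (List String) :=
  F.filter (fun f => !f.contains c)
def pvU (F : List (List String)) : List String :=
  F.foldl (fun a f => PySem.Set.union a f) []

-- proof-only recursive reference emitter: split on the first maximal characteristic
def pvPred (F : List (List String)) (c : String) : Bool :=
  !((pvU F).any (fun d =>
    (F.filter (fun f => f.contains c)).all (fun f => f.contains d)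
      && !((F.filter (fun f => f.contains d)).all (fun f => f.contains c))))

def pvEmit (F : List (List String)) : List String :=
  if F = [] ∨ F = [[]] then [] else
    match (pvU F).attach.find? (fun c => pvPred F c.val) with
    | none => []
    | some sp =>
        pvEmit (pvG1 F sp.val) ++ pvEmit (pvG2 F sp.val) ++ [sp.val]
termination_by pvMeasure F
decreasing_by
  · try simp only [pvG1, List.map_subtype, List.unattach_filter, List.unattach_attach]
    exact pvMeasure_strip_lt F sp.val ((pv_mem_unionAll sp.property).resolve_left (by simp))
  · try simp only [pvG2, List.map_subtype, List.unattach_filter, List.unattach_attach]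
    exact pvMeasure_without_lt F sp.val ((pv_mem_unionAll sp.property).resolve_left (by simp))

-- semantic vocabulary: row equality as sets, occurrence, nesting, disjointness, laminarity
def pvSetEq (f g : List String) : Prop := ∀ x, x ∈ f ↔ x ∈ g
def pvOccurs (F : List (List String)) (x : String) : Prop := ∃ f ∈ F, x ∈ f
def pvSub (F : List (List String)) (c d : String) : Prop := ∀ f ∈ F, c ∈ f → d ∈ f
def pvDisj (F : List (List String)) (c d : String) : Prop := ∀ f ∈ F, ¬(c ∈ f ∧ d ∈ f)
def pvLam (F : List (List String)) : Prop :=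
  ∀ c d, pvOccurs F c → pvOccurs F d → pvSub F c d ∨ pvSub F d c ∨ pvDisj F c d
def pvNoDup (F : List (List String)) : Prop := F.Pairwise (fun f g => ¬ pvSetEq f g)
def pvValid (F : List (List String)) : Prop := pvNoDup F ∧ pvLam F
def pvMax (F : List (List String)) (c : String) : Prop :=
  ∀ d, pvOccurs F d → pvSub F c d → pvSub F d c

-- membership in the union of all rows
theorem pv_mem_pvU {F : List (List String)} {x : String} : x ∈ pvU F ↔ pvOccurs F x := by
  constructor
  · intro h
    exact ((pv_mem_unionAll h).resolve_left (by simp))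
  · suffices h : ∀ (init : List String), (x ∈ init ∨ pvOccurs F x) →
        x ∈ F.foldl (fun a f => PySem.Set.union a f) init by
      intro hx; exact h [] (Or.inr hx)
    induction F with
    | nil =>
      intro init h
      rcases h with h | ⟨f, hf, hx⟩
      · exact h
      · simp at hf
    | cons f rest ih =>
      intro init h
      apply ih
      rcases h with h | ⟨g, hg, hx⟩
      · exact Or.inl ((PySem.Set.mem_union _ _ _).2 (Or.inl h))
      · rcases List.mem_cons.1 hg with rfl | hg'
        · exact Or.inl ((PySem.Set.mem_union _ _ _).2 (Or.inr hx))
        · exact Or.inr ⟨g, hg', hx⟩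

theorem pv_mem_strip {f : List String} {c x : String} :
    x ∈ PySem.Set.diff f [c] ↔ x ∈ f ∧ x ≠ c := by
  rw [PySem.Set.mem_diff]; simp

theorem pv_occurs_G1 {F : List (List String)} {c d : String} :
    pvOccurs (pvG1 F c) d ↔ d ≠ c ∧ ∃ f ∈ F, c ∈ f ∧ d ∈ f := by
  constructor
  · rintro ⟨h, hh, hd⟩
    rcases List.mem_map.1 hh with ⟨f, hf, rfl⟩
    rcases List.mem_filter.1 hf with ⟨hfF, hfc⟩
    rcases pv_mem_strip.1 hd with ⟨hdf, hdc⟩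
    exact ⟨hdc, f, hfF, (List.contains_iff_mem).1 hfc, hdf⟩
  · rintro ⟨hdc, f, hf, hc, hd⟩
    exact ⟨PySem.Set.diff f [c], List.mem_map.2 ⟨f, List.mem_filter.2 ⟨hf, (List.contains_iff_mem).2 hc⟩, rfl⟩,
      pv_mem_strip.2 ⟨hd, hdc⟩⟩

theorem pv_occurs_G2 {F : List (List String)} {c d : String} :
    pvOccurs (pvG2 F c) d ↔ ∃ f ∈ F, c ∉ f ∧ d ∈ f := by
  constructor
  · rintro ⟨f, hf, hd⟩
    rcases List.mem_filter.1 hf with ⟨hfF, hfc⟩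
    exact ⟨f, hfF, by simpa using hfc, hd⟩
  · rintro ⟨f, hf, hc, hd⟩
    exact ⟨f, List.mem_filter.2 ⟨hf, by simpa using hc⟩, hd⟩

theorem pv_subBool_iff {F : List (List String)} {c d : String} :
    ((F.filter (fun f => f.contains c)).all (fun f => f.contains d)) = true ↔ pvSub F c d := by
  rw [List.all_eq_true]
  constructor
  · intro h f hf hc
    exact (List.contains_iff_mem).1
      (h f (List.mem_filter.2 ⟨hf, (List.contains_iff_mem).2 hc⟩))
  · intro h f hf
    rcases List.mem_filter.1 hf with ⟨hfF, hfc⟩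
    exact (List.contains_iff_mem).2 (h f hfF ((List.contains_iff_mem).1 hfc))

theorem pv_disjBool_iff {F : List (List String)} {c d : String} :
    (!(F.any (fun f => f.contains c && f.contains d))) = true ↔ pvDisj F c d := by
  rw [Bool.not_eq_true', List.any_eq_false]
  constructor
  · intro h f hf hcd
    have hne := h f hf
    simp only [Bool.and_eq_true, not_and] at hne
    exact hne ((List.contains_iff_mem).2 hcd.1) ((List.contains_iff_mem).2 hcd.2)
  · intro h f hf
    simp only [Bool.and_eq_true, not_and]
    intro hc hd
    exact h f hf ⟨(List.contains_iff_mem).1 hc, (List.contains_iff_mem).1 hd⟩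

-- B's characteristic list is exactly A's union fold
theorem pv_chars_eq (F : List (List String)) : pvChars F = pvU F := by
  suffices h : ∀ (G : List (List String)) (init : List String),
      (G.flatMap (fun f => f)).foldl PySem.Set.add init
        = G.foldl (fun a f => PySem.Set.union a f) init by
    exact h F []
  intro G
  induction G with
  | nil => intro init; rfl
  | cons f rest ih =>
    intro init
    simp only [List.flatMap_cons, List.foldl_append, List.foldl_cons]
    exact ih _

theorem pv_laminarOk_iff {F : List (List String)} :
    pvLaminarOk F (pvU F) = true ↔ pvLam F := by
  unfold pvLaminarOk
  simp only [List.all_eq_true]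
  constructor
  · intro h c d hc hd
    have hcd := h c (pv_mem_pvU.2 hc) d (pv_mem_pvU.2 hd)
    simp only [Bool.or_eq_true] at hcd
    rcases hcd with (h' | h') | h'
    · exact Or.inl (pv_subBool_iff.1 h')
    · exact Or.inr (Or.inl (pv_subBool_iff.1 h'))
    · exact Or.inr (Or.inr (pv_disjBool_iff.1 h'))
  · intro h c hc d hd
    simp only [Bool.or_eq_true]
    rcases h c d (pv_mem_pvU.1 hc) (pv_mem_pvU.1 hd) with h' | h' | h'
    · exact Or.inl (Or.inl (pv_subBool_iff.2 h'))
    · exact Or.inl (Or.inr (pv_subBool_iff.2 h'))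
    · exact Or.inr (pv_disjBool_iff.2 h')

theorem pv_rowDup_iff : ∀ (F seen : List (List String)),
    pvRowDup F seen = false ↔ ((∀ f ∈ F, ∀ g ∈ seen, ¬ pvSetEq f g) ∧ pvNoDup F) := by
  intro F
  induction F with
  | nil => intro seen; simp [pvRowDup, pvNoDup]
  | cons f rest ih =>
    intro seen
    unfold pvRowDup
    by_cases h : seen.any (fun g => PySem.Set.equal f g) = true
    · rw [if_pos h]
      constructor
      · intro h'; simp at h'
      · rintro ⟨hcross, _⟩
        rcases List.any_eq_true.1 h with ⟨g, hg, he⟩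
        exact absurd (fun x => (PySem.Set.equal_iff f g).1 he x) (hcross f (by simp) g hg)
    · rw [if_neg h, ih (f :: seen)]
      have hf : ∀ g ∈ seen, ¬ pvSetEq f g := by
        intro g hg he
        exact h (List.any_eq_true.2 ⟨g, hg, (PySem.Set.equal_iff f g).2 he⟩)
      constructor
      · rintro ⟨hcross, hnd⟩
        refine ⟨?_, ?_⟩
        · intro f' hf' g hg
          rcases List.mem_cons.1 hf' with rfl | hf''
          · exact hf g hg
          · exact hcross f' hf'' g (by simp [hg])
        · refine List.pairwise_cons.2 ⟨?_, hnd⟩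
          intro g hg he
          exact hcross g hg f (by simp) (fun x => (he x).symm)
      · rintro ⟨hcross, hnd⟩
        rcases List.pairwise_cons.1 hnd with ⟨hhead, htail⟩
        refine ⟨?_, htail⟩
        intro f' hf' g hg
        rcases List.mem_cons.1 hg with rfl | hg'
        · exact fun he => hhead f' hf' (fun x => (he x).symm)
        · exact hcross f' (List.mem_cons_of_mem f hf') g hg'

theorem pv_rowDup_false_iff {F : List (List String)} :
    pvRowDup F [] = false ↔ pvNoDup F := by
  rw [pv_rowDup_iff]; simp

-- set-equality of rows interacts with stripping the split characteristic
theorem pv_setEq_strip {f g : List String} (h : pvSetEq f g) (c : String) :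
    pvSetEq (PySem.Set.diff f [c]) (PySem.Set.diff g [c]) := by
  intro x; rw [pv_mem_strip, pv_mem_strip, h x]

theorem pv_strip_setEq {f g : List String} {c : String} (hcf : c ∈ f) (hcg : c ∈ g)
    (h : pvSetEq (PySem.Set.diff f [c]) (PySem.Set.diff g [c])) : pvSetEq f g := by
  intro x
  by_cases hx : x = c
  · subst hx; simp [hcf, hcg]
  · constructor
    · intro hxf; exact (pv_mem_strip.1 ((h x).1 (pv_mem_strip.2 ⟨hxf, hx⟩))).1
    · intro hxg; exact (pv_mem_strip.1 ((h x).2 (pv_mem_strip.2 ⟨hxg, hx⟩))).1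

-- validity is inherited by both sub-families, for every split characteristic
theorem pv_valid_G2 {F : List (List String)} (h : pvValid F) (c : String) : pvValid (pvG2 F c) := by
  obtain ⟨hnd, hlam⟩ := h
  refine ⟨hnd.filter _, ?_⟩
  intro d e hd he
  rcases pv_occurs_G2.1 hd with ⟨f, hf, _, hdf⟩
  rcases pv_occurs_G2.1 he with ⟨g, hg, _, heg⟩
  rcases hlam d e ⟨f, hf, hdf⟩ ⟨g, hg, heg⟩ with h' | h' | h'
  · exact Or.inl (fun f' hf' => h' f' (List.mem_of_mem_filter hf'))
  · exact Or.inr (Or.inl (fun f' hf' => h' f' (List.mem_of_mem_filter hf')))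
  · exact Or.inr (Or.inr (fun f' hf' => h' f' (List.mem_of_mem_filter hf')))

theorem pv_valid_G1 {F : List (List String)} (h : pvValid F) (c : String) : pvValid (pvG1 F c) := by
  obtain ⟨hnd, hlam⟩ := h
  constructor
  · unfold pvG1 pvNoDup
    rw [List.pairwise_map]
    refine List.Pairwise.imp_of_mem ?_ (hnd.filter _)
    intro f g hf hg hne he
    exact hne (pv_strip_setEq ((List.contains_iff_mem).1 (List.mem_filter.1 hf).2)
      ((List.contains_iff_mem).1 (List.mem_filter.1 hg).2) he)
  · intro d e hd he
    rcases pv_occurs_G1.1 hd with ⟨hdc, f, hf, hcf, hdf⟩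
    rcases pv_occurs_G1.1 he with ⟨hec, g, hg, hcg, heg⟩
    have key : ∀ p q : String, q ≠ c → pvSub F p q → pvSub (pvG1 F c) p q := by
      intro p q hqc hs h' hh hp
      rcases List.mem_map.1 hh with ⟨f', hf', rfl⟩
      exact pv_mem_strip.2 ⟨hs f' (List.mem_of_mem_filter hf') (pv_mem_strip.1 hp).1, hqc⟩
    have keyD : pvDisj F d e → pvDisj (pvG1 F c) d e := by
      intro hd' h' hh hpair
      rcases List.mem_map.1 hh with ⟨f', hf', rfl⟩
      exact hd' f' (List.mem_of_mem_filter hf') ⟨(pv_mem_strip.1 hpair.1).1, (pv_mem_strip.1 hpair.2).1⟩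
    rcases hlam d e ⟨f, hf, hdf⟩ ⟨g, hg, heg⟩ with h' | h' | h'
    · exact Or.inl (key d e hec h')
    · exact Or.inr (Or.inl (key e d hdc h'))
    · exact Or.inr (Or.inr (keyD h'))

-- a pairwise property holds on a list once it holds on both filter halves and across them
theorem pv_pairwise_of_partition {α : Type} {P : α → α → Prop} {q : α → Bool} :
    ∀ {l : List α}, (l.filter q).Pairwise P → (l.filter (fun a => !q a)).Pairwise P →
    (∀ a ∈ l, ∀ b ∈ l, q a = true → q b = false → P a b ∧ P b a) → l.Pairwise P := by
  intro l
  induction l with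
  | nil => intro _ _ _; exact List.Pairwise.nil
  | cons a l ih =>
    intro h1 h2 hcross
    by_cases ha : q a = true
    · rw [List.filter_cons_of_pos ha] at h1
      rw [List.filter_cons_of_neg (by simp [ha])] at h2
      rcases List.pairwise_cons.1 h1 with ⟨hhead, htail⟩
      refine List.pairwise_cons.2 ⟨?_, ih htail h2 ?_⟩
      · intro b hb
        by_cases hbq : q b = true
        · exact hhead b (List.mem_filter.2 ⟨hb, hbq⟩)
        · exact (hcross a (by simp) b (by simp [hb]) ha (by simpa using hbq)).1
      · intro x hx y hy hxq hyq
        exact hcross x (by simp [hx]) y (by simp [hy]) hxq hyq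
    · rw [List.filter_cons_of_neg ha] at h1
      rw [List.filter_cons_of_pos (by simpa using ha)] at h2
      rcases List.pairwise_cons.1 h2 with ⟨hhead, htail⟩
      refine List.pairwise_cons.2 ⟨?_, ih h1 htail ?_⟩
      · intro b hb
        by_cases hbq : q b = true
        · exact (hcross b (by simp [hb]) a (by simp) hbq (by simpa using ha)).2
        · exact hhead b (List.mem_filter.2 ⟨hb, by simpa using hbq⟩)
      · intro x hx y hy hxq hyq
        exact hcross x (by simp [hx]) y (by simp [hy]) hxq hyq

-- reconstruction: validity of the two sub-families (plus disjoint characteristic sets) gives validity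
theorem pv_nodup_of_parts {F : List (List String)} {c : String}
    (h1 : pvNoDup (pvG1 F c)) (h2 : pvNoDup (pvG2 F c)) : pvNoDup F := by
  apply pv_pairwise_of_partition (q := fun f => f.contains c)
  · unfold pvG1 pvNoDup at h1
    rw [List.pairwise_map] at h1
    refine List.Pairwise.imp_of_mem ?_ h1
    intro f g _ _ hne he
    exact hne (pv_setEq_strip he c)
  · exact h2
  · intro f _ g _ hq hnq
    have hcf : c ∈ f := (List.contains_iff_mem).1 hq
    have hcg : c ∉ g := by simpa using hnq
    constructor
    · intro he; exact hcg ((he c).1 hcf)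
    · intro he; exact hcg ((he c).2 hcf)

theorem pv_lam_of_parts {F : List (List String)} {c : String}
    (h1 : pvLam (pvG1 F c)) (h2 : pvLam (pvG2 F c))
    (hdisj : ∀ x, ¬(pvOccurs (pvG1 F c) x ∧ pvOccurs (pvG2 F c) x)) : pvLam F := by
  have cover1 : ∀ d, d ≠ c → pvOccurs (pvG1 F c) d → ∀ f ∈ F, d ∈ f → c ∈ f := by
    intro d hdc hocc f hf hdf
    by_contra hcf
    exact hdisj d ⟨hocc, pv_occurs_G2.2 ⟨f, hf, hcf, hdf⟩⟩
  have cover2 : ∀ d, d ≠ c → pvOccurs (pvG2 F c) d → ∀ f ∈ F, d ∈ f → c ∉ f := by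
    intro d hdc hocc f hf hdf hcf
    exact hdisj d ⟨pv_occurs_G1.2 ⟨hdc, f, hf, hcf, hdf⟩, hocc⟩
  have sides : ∀ d, pvOccurs F d → d = c ∨ pvOccurs (pvG1 F c) d ∨ pvOccurs (pvG2 F c) d := by
    rintro d ⟨f, hf, hdf⟩
    by_cases hdc : d = c
    · exact Or.inl hdc
    · by_cases hcf : c ∈ f
      · exact Or.inr (Or.inl (pv_occurs_G1.2 ⟨hdc, f, hf, hcf, hdf⟩))
      · exact Or.inr (Or.inr (pv_occurs_G2.2 ⟨f, hf, hcf, hdf⟩))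
  intro d e hd he
  by_cases hde : d = e
  · exact Or.inl (fun f _ h => hde ▸ h)
  rcases sides d hd with hdc | hd1 | hd2
  · subst hdc
    rcases sides e he with hec | he1 | he2
    · exact Or.inl (fun f _ h => hec ▸ h)
    · have hec : e ≠ d := fun h => hde h.symm
      exact Or.inr (Or.inl (fun f hf hef => cover1 e hec he1 f hf hef))
    · have hec : e ≠ d := fun h => hde h.symm
      exact Or.inr (Or.inr (fun f hf hpair => cover2 e hec he2 f hf hpair.2 hpair.1))
  · rcases sides e he with hec | he1 | he2
    · subst hec
      have hdc : d ≠ e := hde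
      exact Or.inl (fun f hf hdf => cover1 d hdc hd1 f hf hdf)
    · have hdc : d ≠ c := by
        rintro rfl
        rcases pv_occurs_G1.1 hd1 with ⟨hcc, _⟩; exact hcc rfl
      have hec : e ≠ c := by
        rintro rfl
        rcases pv_occurs_G1.1 he1 with ⟨hcc, _⟩; exact hcc rfl
      rcases h1 d e hd1 he1 with h' | h' | h'
      · refine Or.inl ?_
        intro f hf hdf
        have hcf : c ∈ f := cover1 d hdc hd1 f hf hdf
        have : d ∈ PySem.Set.diff f [c] := pv_mem_strip.2 ⟨hdf, hdc⟩
        have hmem : PySem.Set.diff f [c] ∈ pvG1 F c :=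
          List.mem_map.2 ⟨f, List.mem_filter.2 ⟨hf, (List.contains_iff_mem).2 hcf⟩, rfl⟩
        exact (pv_mem_strip.1 (h' _ hmem this)).1
      · refine Or.inr (Or.inl ?_)
        intro f hf hef
        have hcf : c ∈ f := cover1 e hec he1 f hf hef
        have : e ∈ PySem.Set.diff f [c] := pv_mem_strip.2 ⟨hef, hec⟩
        have hmem : PySem.Set.diff f [c] ∈ pvG1 F c :=
          List.mem_map.2 ⟨f, List.mem_filter.2 ⟨hf, (List.contains_iff_mem).2 hcf⟩, rfl⟩
        exact (pv_mem_strip.1 (h' _ hmem this)).1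
      · refine Or.inr (Or.inr ?_)
        intro f hf hpair
        have hcf : c ∈ f := cover1 d hdc hd1 f hf hpair.1
        have hmem : PySem.Set.diff f [c] ∈ pvG1 F c :=
          List.mem_map.2 ⟨f, List.mem_filter.2 ⟨hf, (List.contains_iff_mem).2 hcf⟩, rfl⟩
        exact h' _ hmem ⟨pv_mem_strip.2 ⟨hpair.1, hdc⟩, pv_mem_strip.2 ⟨hpair.2, hec⟩⟩
    · have hdc : d ≠ c := by
        rintro rfl
        rcases pv_occurs_G1.1 hd1 with ⟨hcc, _⟩; exact hcc rfl
      have hec : e ≠ c := by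
        rintro rfl
        rcases pv_occurs_G2.1 he2 with ⟨g, hg, hcg, heg⟩; exact hcg heg
      refine Or.inr (Or.inr ?_)
      intro f hf hpair
      by_cases hcf : c ∈ f
      · exact hdisj e ⟨pv_occurs_G1.2 ⟨hec, f, hf, hcf, hpair.2⟩, he2⟩
      · exact hdisj d ⟨hd1, pv_occurs_G2.2 ⟨f, hf, hcf, hpair.1⟩⟩
  · rcases sides e he with hec | he1 | he2
    · subst hec
      have hdc : d ≠ e := hde
      exact Or.inr (Or.inr (fun f hf hpair => cover2 d hdc hd2 f hf hpair.1 hpair.2))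
    · have hdc : d ≠ c := by
        rintro rfl
        rcases pv_occurs_G2.1 hd2 with ⟨g, hg, hcg, heg⟩; exact hcg heg
      have hec : e ≠ c := by
        rintro rfl
        rcases pv_occurs_G1.1 he1 with ⟨hcc, _⟩; exact hcc rfl
      refine Or.inr (Or.inr ?_)
      intro f hf hpair
      by_cases hcf : c ∈ f
      · exact hdisj d ⟨pv_occurs_G1.2 ⟨hdc, f, hf, hcf, hpair.1⟩, hd2⟩
      · exact hdisj e ⟨he1, pv_occurs_G2.2 ⟨f, hf, hcf, hpair.2⟩⟩
    · have hdc : d ≠ c := by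
        rintro rfl
        rcases pv_occurs_G2.1 hd2 with ⟨g, hg, hcg, heg⟩; exact hcg heg
      have hec : e ≠ c := by
        rintro rfl
        rcases pv_occurs_G2.1 he2 with ⟨g, hg, hcg, heg⟩; exact hcg heg
      have memG2 : ∀ f ∈ F, c ∉ f → f ∈ pvG2 F c := by
        intro f hf hcf
        exact List.mem_filter.2 ⟨hf, by simpa using hcf⟩
      rcases h2 d e hd2 he2 with h' | h' | h'
      · exact Or.inl (fun f hf hdf => h' f (memG2 f hf (cover2 d hdc hd2 f hf hdf)) hdf)
      · exact Or.inr (Or.inl (fun f hf hef => h' f (memG2 f hf (cover2 e hec he2 f hf hef)) hef))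
      · exact Or.inr (Or.inr (fun f hf hpair => h' f (memG2 f hf (cover2 d hdc hd2 f hf hpair.1)) hpair))

-- a nonempty list has an element maximizing any Nat-valued key
theorem pv_exists_max_key {α : Type} (l : List α) (k : α → Nat) (h : l ≠ []) :
    ∃ a ∈ l, ∀ b ∈ l, k b ≤ k a := by
  induction l with
  | nil => exact absurd rfl h
  | cons a l ih =>
    cases l with
    | nil => exact ⟨a, by simp⟩
    | cons a' l' =>
      rcases ih (by simp) with ⟨m, hm, hmax⟩
      by_cases hk : k a ≤ k m
      · refine ⟨m, List.mem_cons_of_mem a hm, ?_⟩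
        intro b hb
        rcases List.mem_cons.1 hb with rfl | hb'
        · exact hk
        · exact hmax b hb'
      · refine ⟨a, by simp, ?_⟩
        intro b hb
        rcases List.mem_cons.1 hb with rfl | hb'
        · exact le_refl _
        · exact le_trans (hmax b hb') (Nat.le_of_not_le hk)

-- a larger row-set has at least as large a row count
theorem pv_countP_le {c d : String} : ∀ (l : List (List String)), pvSub l c d →
    l.countP (fun f => f.contains c) ≤ l.countP (fun f => f.contains d) := by
  intro l hs
  induction l with
  | nil => simp
  | cons x xs ihx =>
    have hs' : pvSub xs c d := fun g hg => hs g (List.mem_cons_of_mem x hg)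
    have hx := ihx hs'
    rw [List.countP_cons, List.countP_cons]
    by_cases hc : x.contains c = true
    · rw [if_pos hc, if_pos ((List.contains_iff_mem).2 (hs x (by simp) ((List.contains_iff_mem).1 hc)))]
      omega
    · rw [if_neg hc]
      by_cases hd : x.contains d = true
      · rw [if_pos hd]; omega
      · rw [if_neg hd]; omega

-- a strictly larger row-set has a strictly larger row count
theorem pv_countP_lt {c d : String} : ∀ (F : List (List String)), pvSub F c d →
    (∃ g ∈ F, d ∈ g ∧ c ∉ g) →
    F.countP (fun f => f.contains c) < F.countP (fun f => f.contains d) := by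
  intro F
  induction F with
  | nil =>
    rintro _ ⟨g, hg, _⟩
    simp at hg
  | cons f rest ih =>
    rintro hsub ⟨g, hg, hdg, hcg⟩
    have hsub' : pvSub rest c d := fun g' hg' => hsub g' (List.mem_cons_of_mem f hg')
    rw [List.countP_cons, List.countP_cons]
    rcases List.mem_cons.1 hg with rfl | hg'
    · rw [if_neg (fun h => hcg ((List.contains_iff_mem).1 h)),
        if_pos ((List.contains_iff_mem).2 hdg)]
      have := pv_countP_le rest hsub'
      omega
    · have hlt := ih hsub' ⟨g, hg', hdg, hcg⟩
      by_cases hc : f.contains c = true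
      · rw [if_pos hc, if_pos ((List.contains_iff_mem).2
          (hsub f (by simp) ((List.contains_iff_mem).1 hc)))]
        omega
      · rw [if_neg hc]
        by_cases hd : f.contains d = true
        · rw [if_pos hd]; omega
        · rw [if_neg hd]; omega

-- some characteristic of a nonempty union is maximal
theorem pv_max_exists {F : List (List String)} (h : pvU F ≠ []) : ∃ c ∈ pvU F, pvMax F c := by
  rcases pv_exists_max_key (pvU F) (fun c => F.countP (fun f => f.contains c)) h with ⟨c, hc, hmax⟩
  refine ⟨c, hc, ?_⟩
  intro d hd hsub
  by_contra hns
  have hw : ∃ g ∈ F, d ∈ g ∧ c ∉ g := by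
    unfold pvSub at hns
    push_neg at hns
    rcases hns with ⟨g, hg, hdg, hcg⟩
    exact ⟨g, hg, hdg, hcg⟩
  exact absurd (hmax d (pv_mem_pvU.2 hd)) (by simpa using pv_countP_lt F hsub hw)

-- the boolean maximality tests of A's reference emitter and of B's loop both mean pvMax
theorem pv_pred_iff {F : List (List String)} {c : String} :
    pvPred F c = true ↔ pvMax F c := by
  unfold pvPred
  rw [Bool.not_eq_true', List.any_eq_false]
  constructor
  · intro h d hd hsub
    have hne := h d (pv_mem_pvU.2 hd)
    simp only [Bool.and_eq_true, Bool.not_eq_true', not_and] at hne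
    have h1 : (F.filter (fun f => f.contains c)).all (fun f => f.contains d) = true :=
      pv_subBool_iff.2 hsub
    have h2 := hne h1
    rcases Bool.eq_false_or_eq_true ((F.filter (fun f => f.contains d)).all (fun f => f.contains c)) with ht | hf
    · exact pv_subBool_iff.1 ht
    · exact absurd hf h2
  · intro h d hd
    simp only [Bool.and_eq_true, Bool.not_eq_true', not_and]
    intro h1
    have := h d (pv_mem_pvU.1 hd) (pv_subBool_iff.1 h1)
    intro hf
    rw [pv_subBool_iff.2 this] at hf
    cases hf

theorem pv_all_not_any {α : Type} (p q : α → Bool) : ∀ (l : List α),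
    (∀ x ∈ l, q x = !p x) → l.all q = !l.any p := by
  intro l
  induction l with
  | nil => intro _; rfl
  | cons a l ih =>
    intro h
    simp only [List.all_cons, List.any_cons, Bool.not_or, h a (by simp),
      ih (fun x hx => h x (by simp [hx]))]

theorem pv_isMax_eq (F : List (List String)) (c : String) : pvIsMax F c = pvPred F c := by
  unfold pvIsMax pvPred
  rw [pv_chars_eq]
  apply pv_all_not_any
  intro d _
  cases h1 : (F.filter (fun f => f.contains c)).all (fun f => f.contains d) <;>
    cases h2 : (F.filter (fun f => f.contains d)).all (fun f => f.contains c) <;> rfl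

-- first-success search aligned with first-satisfier search
theorem pv_findSome?_eq {α β : Type} (l : List α) (att : α → Option β) (p : α → Bool) (v : α → β)
    (h : ∀ x ∈ l, att x = if p x then some (v x) else none) :
    l.findSome? att = (l.find? p).map v := by
  induction l with
  | nil => simp
  | cons a l ih =>
    rw [List.findSome?_cons, List.find?_cons]
    by_cases hp : p a = true
    · rw [h a (by simp), if_pos hp, hp]
      rfl
    · rw [h a (by simp), if_neg hp]
      simp only [Bool.not_eq_true] at hp
      rw [hp]
      exact ih (fun x hx => h x (by simp [hx]))

-- find over a subtype list, projected
theorem pv_find_map_val {α : Type} (p : α → Bool) {m : List α} :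
    ∀ (l : List {x // x ∈ m}),
      (l.find? (fun sp => p sp.val)).map Subtype.val = (l.map Subtype.val).find? p := by
  intro l
  induction l with
  | nil => rfl
  | cons a l ih =>
    rw [List.map_cons, List.find?_cons, List.find?_cons]
    by_cases h : p a.val
    · simp [h]
    · simp only [Bool.not_eq_true] at h
      simp [h, ih]

-- B's find over its characteristic list is A-side's attach-find, projected
theorem pv_find_eq (G : List (List String)) :
    (pvChars G).find? (pvIsMax G)
      = ((pvU G).attach.find? (fun sp => pvPred G sp.val)).map Subtype.val := by
  rw [pv_find_map_val, List.attach_map_subtype_val, pv_chars_eq]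
  have : pvIsMax G = pvPred G := funext (pv_isMax_eq G)
  rw [this]

-- B's inner stripped family is pvG1
theorem pv_filterMap_eq (G : List (List String)) (c : String) :
    G.filterMap (fun f => if f.contains c then some (f.filter (fun x => x != c)) else none)
      = pvG1 G c := by
  have hfun : ∀ f : List String, List.filter (fun x => x != c) f = PySem.Set.diff f [c] := by
    intro f
    unfold PySem.Set.diff
    apply List.filter_congr
    intro x _
    by_cases hxc : x = c
    · subst hxc; simp
    · simp [hxc, bne]
  unfold pvG1
  induction G with
  | nil => rfl
  | cons f rest ih =>
    by_cases h : f.contains c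
    · rw [List.filterMap_cons]
      simp only [h, if_true]
      rw [List.filter_cons_of_pos (by simpa using h), List.map_cons, ih]
      rw [hfun f]
    · rw [List.filterMap_cons]
      simp only [h, Bool.false_eq_true, if_false]
      rw [List.filter_cons_of_neg (by simpa using h)]
      exact ih

-- B's accumulator size is A's measure
theorem pv_size_eq (F : List (List String)) : pvSize F = pvMeasure F := by
  suffices h : ∀ (G : List (List String)) (a : Nat),
      G.foldl (fun a f => a + f.length + 1) a = a + pvMeasure G by
    simpa using h F 0
  intro G
  induction G with
  | nil => intro a; simp [pvMeasure]
  | cons f rest ih =>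
    intro a
    simp only [List.foldl_cons, ih, pvMeasure, List.map_cons, List.sum_cons, List.length_cons]
    omega

-- splitting never grows the measure, and strictly shrinks it when the characteristic occurs
theorem pv_split_le (c : String) : ∀ (G : List (List String)),
    pvMeasure (pvG1 G c) + pvMeasure (pvG2 G c) ≤ pvMeasure G := by
  intro G
  induction G with
  | nil => simp [pvG1, pvG2, pvMeasure]
  | cons f rest ih =>
    unfold pvG1 pvG2 at *
    by_cases hf : f.contains c
    · have hd : (PySem.Set.diff f [c]).length ≤ f.length := List.length_filter_le _ _
      simp only [pvMeasure, List.filter_cons, hf, Bool.not_true, if_true, Bool.false_eq_true,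
        if_false, List.map_cons, List.sum_cons, List.length_cons] at *
      omega
    · simp only [pvMeasure, List.filter_cons, hf, Bool.false_eq_true, if_false,
        Bool.not_false, if_true, List.map_cons, List.sum_cons, List.length_cons] at *
      omega

theorem pv_split_lt (G : List (List String)) (c : String) (h : ∃ f ∈ G, c ∈ f) :
    pvMeasure (pvG1 G c) + pvMeasure (pvG2 G c) < pvMeasure G := by
  induction G with
  | nil => simp at h
  | cons f rest ih =>
    rcases h with ⟨g, hg, hc⟩
    simp only [List.mem_cons] at hg
    unfold pvG1 pvG2 at *
    by_cases hf : f.contains c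
    · have hcf : c ∈ f := (List.contains_iff_mem).1 hf
      have hd : (PySem.Set.diff f [c]).length < f.length := by
        apply List.length_filter_lt_length_iff_exists.2
        exact ⟨c, hcf, by simp⟩
      have hle := pv_split_le c rest
      unfold pvG1 pvG2 at hle
      simp only [pvMeasure, List.filter_cons, hf, Bool.not_true, if_true, Bool.false_eq_true,
        if_false, List.map_cons, List.sum_cons, List.length_cons] at *
      omega
    · have h' : ∃ g ∈ rest, c ∈ g := by
        rcases hg with rfl | hg
        · exact absurd hc (pv_notmem hf)
        · exact ⟨g, hg, hc⟩
      have := ih h'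
      simp only [pvMeasure, List.filter_cons, hf, Bool.false_eq_true, if_false,
        Bool.not_false, if_true, List.map_cons, List.sum_cons, List.length_cons] at *
      omega

-- what a task contributes to the output, and its iteration budget
def pvTaskOut : PvTask → List String
  | PvTask.fam G => pvEmit G
  | PvTask.chr c => [c]
def pvStackOut (st : List PvTask) : List String := st.flatMap pvTaskOut
def pvTaskCost : PvTask → Nat
  | PvTask.fam G => 3 * pvMeasure G + 1
  | PvTask.chr _ => 1
def pvStackCost (st : List PvTask) : Nat := (st.map pvTaskCost).sum

-- unfolding equations for A's port and the reference emitter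
theorem pv_build_base {F : List (List String)} (h : F = [] ∨ F = [[]]) : build F = some [] := by
  rw [build.eq_def, if_pos h]

theorem pv_emit_base {F : List (List String)} (h : F = [] ∨ F = [[]]) : pvEmit F = [] := by
  rw [pvEmit.eq_def, if_pos h]

theorem pv_build_step {F : List (List String)} (h : ¬(F = [] ∨ F = [[]])) :
    build F = (pvU F).attach.findSome? (fun sp =>
      match build (pvG1 F sp.val), build (pvG2 F sp.val) with
      | some av, some bv =>
          if PySem.Set.inter av bv = [] then
            some (PySem.Set.add (PySem.Set.union av bv) sp.val)
          else none
      | _, _ => none) := by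
  rw [build.eq_def, if_neg h]
  rfl

theorem pv_emit_step {F : List (List String)} (h : ¬(F = [] ∨ F = [[]])) :
    pvEmit F = (match (pvU F).attach.find? (fun c => pvPred F c.val) with
      | none => []
      | some sp => pvEmit (pvG1 F sp.val) ++ pvEmit (pvG2 F sp.val) ++ [sp.val]) := by
  rw [pvEmit.eq_def, if_neg h]

-- the worklist loop, run with enough fuel, empties the stack into its contributions
theorem pv_run_spec : ∀ (n : Nat) (st : List PvTask) (acc : List String),
    pvStackCost st ≤ n → pvRun n st acc = acc.reverse ++ pvStackOut st := by
  intro n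
  induction n with
  | zero =>
    intro st acc h
    cases st with
    | nil => simp [pvRun, pvStackOut]
    | cons t rest =>
      exfalso
      cases t <;> simp [pvStackCost, pvTaskCost] at h
  | succ n ih =>
    intro st acc h
    cases st with
    | nil => simp [pvRun, pvStackOut]
    | cons t rest =>
      cases t with
      | chr c =>
        have hc : pvStackCost rest ≤ n := by
          simp only [pvStackCost, List.map_cons, List.sum_cons, pvTaskCost] at h ⊢
          omega
        show pvRun n rest (c :: acc) = _
        rw [ih rest (c :: acc) hc]
        simp [pvStackOut, pvTaskOut]
      | fam G =>
        have hcost : 3 * pvMeasure G + 1 + pvStackCost rest ≤ n + 1 := by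
          simpa [pvStackCost, pvTaskCost] using h
        by_cases hb : G = [] ∨ G = [[]]
        · show (if G = [] ∨ G = [[]] then pvRun n rest acc else _) = _
          rw [if_pos hb, ih rest acc (by omega)]
          simp [pvStackOut, pvTaskOut, pv_emit_base hb]
        · show (if G = [] ∨ G = [[]] then pvRun n rest acc
              else match (pvChars G).find? (pvIsMax G) with
                | none => pvRun n rest acc
                | some c => pvRun n
                    (PvTask.fam (G.filterMap (fun f =>
                        if f.contains c then some (f.filter (fun x => x != c)) else none))
                      :: PvTask.fam (G.filter (fun f => !f.contains c))
                      :: PvTask.chr c :: rest) acc) = _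
          rw [if_neg hb, pv_find_eq G]
          cases hres : (pvU G).attach.find? (fun sp => pvPred G sp.val) with
          | none =>
            show pvRun n rest acc = _
            rw [ih rest acc (by omega)]
            simp [pvStackOut, pvTaskOut, pv_emit_step hb, hres]
          | some sp =>
            show pvRun n
                (PvTask.fam (G.filterMap (fun f =>
                    if f.contains sp.val then some (f.filter (fun x => x != sp.val)) else none))
                  :: PvTask.fam (G.filter (fun f => !f.contains sp.val))
                  :: PvTask.chr sp.val :: rest) acc = _
            rw [pv_filterMap_eq]
            have hG2 : List.filter (fun f => !f.contains sp.val) G = pvG2 G sp.val := rfl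
            rw [hG2]
            have hmem : ∃ f ∈ G, sp.val ∈ f := pv_mem_pvU.1 sp.property
            have hlt := pv_split_lt G sp.val hmem
            have hcost' : pvStackCost
                (PvTask.fam (pvG1 G sp.val) :: PvTask.fam (pvG2 G sp.val)
                  :: PvTask.chr sp.val :: rest) ≤ n := by
              simp only [pvStackCost, List.map_cons, List.sum_cons, pvTaskCost]
              simp only [pvStackCost] at hcost
              omega
            rw [ih _ acc hcost']
            simp [pvStackOut, pvTaskOut, pv_emit_step hb, hres, List.append_assoc]

theorem pv_run_emit (F : List (List String)) :
    pvRun (3 * pvSize F + 1) [PvTask.fam F] [] = pvEmit F := by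
  rw [pv_run_spec (3 * pvSize F + 1) [PvTask.fam F] []
      (by simp [pvStackCost, pvTaskCost, pv_size_eq])]
  simp [pvStackOut, pvTaskOut]

theorem pv_valid_base {F : List (List String)} (h : F = [] ∨ F = [[]]) : pvValid F := by
  rcases h with rfl | rfl
  · refine ⟨List.Pairwise.nil, ?_⟩
    rintro c d ⟨f, hf, _⟩ _
    simp at hf
  · refine ⟨List.pairwise_singleton _ _, ?_⟩
    rintro c d ⟨f, hf, hc⟩ _
    simp at hf
    subst hf
    simp at hc

theorem pv_occurs_base {F : List (List String)} (h : F = [] ∨ F = [[]]) (x : String) :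
    ¬ pvOccurs F x := by
  rcases h with rfl | rfl
  · rintro ⟨f, hf, _⟩; simp at hf
  · rintro ⟨f, hf, hx⟩
    simp at hf
    subst hf
    simp at hx

-- a non-base valid family has a nonempty union of characteristics
theorem pv_U_ne_nil {F : List (List String)} (h0 : ¬(F = [] ∨ F = [[]])) (hnd : pvNoDup F) :
    pvU F ≠ [] := by
  intro hU
  have hrows : ∀ f ∈ F, f = [] := by
    intro f hf
    rcases List.eq_nil_or_concat' f with rfl | ⟨g, x, rfl⟩
    · rfl
    · have hx : pvOccurs F x := ⟨g ++ [x], hf, by simp⟩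
      exact absurd (pv_mem_pvU.2 hx) (by simp [hU])
  match F, h0 with
  | [], h0 => exact h0 (Or.inl rfl)
  | [f], h0 =>
    exact h0 (Or.inr (by rw [hrows f (by simp)]))
  | f :: g :: rest, h0 =>
    have hf : f = [] := hrows f (by simp)
    have hg : g = [] := hrows g (by simp)
    rcases List.pairwise_cons.1 hnd with ⟨hhead, _⟩
    exact hhead g (by simp) (by subst hf; subst hg; intro x; rfl)

-- at a maximal split, the characteristics of the two sub-families are disjoint
theorem pv_max_disjoint {F : List (List String)} {c : String} (hv : pvValid F)
    (hm : pvMax F c) : ∀ x, ¬(pvOccurs (pvG1 F c) x ∧ pvOccurs (pvG2 F c) x) := by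
  rintro x ⟨h1, h2⟩
  rcases pv_occurs_G1.1 h1 with ⟨hxc, f, hf, hcf, hxf⟩
  rcases pv_occurs_G2.1 h2 with ⟨g, hg, hcg, hxg⟩
  have hocc : pvOccurs F x := ⟨f, hf, hxf⟩
  have hoccc : pvOccurs F c := ⟨f, hf, hcf⟩
  rcases hv.2 c x hoccc hocc with h' | h' | h'
  · exact hcg (hm x hocc h' g hg hxg)
  · exact hcg (h' g hg hxg)
  · exact h' f hf ⟨hcf, hxf⟩

-- at a non-maximal split the two sub-families share a characteristic
theorem pv_nonmax_common {F : List (List String)} {c : String} (hocc : pvOccurs F c)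
    (hm : ¬ pvMax F c) : ∃ x, pvOccurs (pvG1 F c) x ∧ pvOccurs (pvG2 F c) x := by
  unfold pvMax at hm
  push_neg at hm
  rcases hm with ⟨d, hd, hsub, hnsub⟩
  unfold pvSub at hnsub
  push_neg at hnsub
  rcases hnsub with ⟨g, hg, hdg, hcg⟩
  have hdc : d ≠ c := by
    rintro rfl
    exact hcg hdg
  rcases hocc with ⟨f, hf, hcf⟩
  refine ⟨d, pv_occurs_G1.2 ⟨hdc, f, hf, hcf, hsub f hf hcf⟩, pv_occurs_G2.2 ⟨g, hg, hcg, hdg⟩⟩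

-- the main induction: A computes exactly "if valid then the emitted list else None"
theorem pv_main : ∀ (n : Nat) (F : List (List String)), pvMeasure F ≤ n →
    ((pvValid F → (build F = some (pvEmit F) ∧ (pvEmit F).Nodup ∧
        (∀ x, x ∈ pvEmit F ↔ pvOccurs F x)))
      ∧ (¬ pvValid F → build F = none)) := by
  intro n
  induction n with
  | zero =>
    intro F hm
    have hF : F = [] := by
      cases F with
      | nil => rfl
      | cons f rest => simp [pvMeasure] at hm
    subst hF
    constructor
    · intro _
      rw [pv_build_base (Or.inl rfl), pv_emit_base (Or.inl rfl)]
      exact ⟨rfl, List.nodup_nil, fun x => ⟨fun h => by simp at h, fun h => absurd h (pv_occurs_base (Or.inl rfl) x)⟩⟩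
    · intro hv
      exact absurd (pv_valid_base (Or.inl rfl)) hv
  | succ n ih =>
    intro F hm
    by_cases hb : F = [] ∨ F = [[]]
    · constructor
      · intro _
        rw [pv_build_base hb, pv_emit_base hb]
        exact ⟨rfl, List.nodup_nil, fun x => ⟨fun h => by simp at h, fun h => absurd h (pv_occurs_base hb x)⟩⟩
      · intro hv
        exact absurd (pv_valid_base hb) hv
    · have hmeas1 : ∀ c ∈ pvU F, pvMeasure (pvG1 F c) ≤ n := by
        intro c hc
        have := pvMeasure_strip_lt F c (pv_mem_pvU.1 hc)
        unfold pvG1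
        omega
      have hmeas2 : ∀ c ∈ pvU F, pvMeasure (pvG2 F c) ≤ n := by
        intro c hc
        have := pvMeasure_without_lt F c (pv_mem_pvU.1 hc)
        unfold pvG2
        omega
      by_cases hv : pvValid F
      · refine ⟨fun _ => ?_, fun hv' => absurd hv hv'⟩
        obtain ⟨hnd, hlam⟩ := hv
        have hUne := pv_U_ne_nil hb hnd
        have hrec : ∀ c ∈ pvU F,
            (build (pvG1 F c) = some (pvEmit (pvG1 F c)) ∧ (pvEmit (pvG1 F c)).Nodup ∧
              (∀ x, x ∈ pvEmit (pvG1 F c) ↔ pvOccurs (pvG1 F c) x)) ∧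
            (build (pvG2 F c) = some (pvEmit (pvG2 F c)) ∧ (pvEmit (pvG2 F c)).Nodup ∧
              (∀ x, x ∈ pvEmit (pvG2 F c) ↔ pvOccurs (pvG2 F c) x)) := by
          intro c hc
          exact ⟨(ih (pvG1 F c) (hmeas1 c hc)).1 (pv_valid_G1 ⟨hnd, hlam⟩ c),
            (ih (pvG2 F c) (hmeas2 c hc)).1 (pv_valid_G2 ⟨hnd, hlam⟩ c)⟩
        have hatt : ∀ sp ∈ (pvU F).attach,
            (match build (pvG1 F sp.val), build (pvG2 F sp.val) with
              | some av, some bv =>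
                  if PySem.Set.inter av bv = [] then
                    some (PySem.Set.add (PySem.Set.union av bv) sp.val)
                  else none
              | _, _ => none)
            = if (fun c : {x // x ∈ pvU F} => pvPred F c.val) sp then
                some (PySem.Set.add (PySem.Set.union (pvEmit (pvG1 F sp.val))
                  (pvEmit (pvG2 F sp.val))) sp.val)
              else none := by
          intro sp _
          obtain ⟨⟨hb1, hn1, he1⟩, ⟨hb2, hn2, he2⟩⟩ := hrec sp.val sp.property
          rw [hb1, hb2]
          show (if PySem.Set.inter (pvEmit (pvG1 F sp.val)) (pvEmit (pvG2 F sp.val)) = [] then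
              some (PySem.Set.add (PySem.Set.union (pvEmit (pvG1 F sp.val))
                (pvEmit (pvG2 F sp.val))) sp.val)
            else none) = _
          by_cases hmax : pvMax F sp.val
          · have hdisj := pv_max_disjoint ⟨hnd, hlam⟩ hmax
            have hint : PySem.Set.inter (pvEmit (pvG1 F sp.val)) (pvEmit (pvG2 F sp.val)) = [] := by
              apply List.filter_eq_nil_iff.2
              intro x hx hcont
              exact hdisj x ⟨(he1 x).1 hx, (he2 x).1 ((List.contains_iff_mem).1 hcont)⟩
            rw [if_pos hint, if_pos (by simpa using pv_pred_iff.2 hmax)]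
          · rcases pv_nonmax_common (pv_mem_pvU.1 sp.property) hmax with ⟨x, ho1, ho2⟩
            have hint : PySem.Set.inter (pvEmit (pvG1 F sp.val)) (pvEmit (pvG2 F sp.val)) ≠ [] :=
              List.ne_nil_of_mem (List.mem_filter.2 ⟨(he1 x).2 ho1,
                (List.contains_iff_mem).2 ((he2 x).2 ho2)⟩)
            rw [if_neg hint, if_neg (by simpa using fun h => hmax (pv_pred_iff.1 h))]
        rw [pv_build_step hb,
          pv_findSome?_eq _ _ (fun c : {x // x ∈ pvU F} => pvPred F c.val)
            (fun sp => PySem.Set.add (PySem.Set.union (pvEmit (pvG1 F sp.val))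
              (pvEmit (pvG2 F sp.val))) sp.val) hatt]
        rcases pv_max_exists hUne with ⟨c0, hc0, hmax0⟩
        cases hres : (pvU F).attach.find? (fun c : {x // x ∈ pvU F} => pvPred F c.val) with
        | none =>
          exfalso
          have := List.find?_eq_none.1 hres ⟨c0, hc0⟩ (List.mem_attach _ _)
          exact this (by simpa using pv_pred_iff.2 hmax0)
        | some sp =>
          have hpred : pvPred F sp.val = true := by simpa using List.find?_some hres
          have hmax : pvMax F sp.val := pv_pred_iff.1 hpred
          obtain ⟨⟨hb1, hn1, he1⟩, ⟨hb2, hn2, he2⟩⟩ := hrec sp.val sp.property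
          have hdisj := pv_max_disjoint ⟨hnd, hlam⟩ hmax
          have hdisj' : ∀ x ∈ pvEmit (pvG2 F sp.val), x ∉ pvEmit (pvG1 F sp.val) := by
            intro x hx2 hx1
            exact hdisj x ⟨(he1 x).1 hx1, (he2 x).1 hx2⟩
          have hsp1 : sp.val ∉ pvEmit (pvG1 F sp.val) := by
            intro hx
            exact (pv_occurs_G1.1 ((he1 sp.val).1 hx)).1 rfl
          have hsp2 : sp.val ∉ pvEmit (pvG2 F sp.val) := by
            intro hx
            rcases pv_occurs_G2.1 ((he2 sp.val).1 hx) with ⟨g, _, hcg, hxg⟩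
            exact hcg hxg
          have hunion : PySem.Set.union (pvEmit (pvG1 F sp.val)) (pvEmit (pvG2 F sp.val))
              = pvEmit (pvG1 F sp.val) ++ pvEmit (pvG2 F sp.val) :=
            PySem.Set.update_eq_append_of_disjoint _ _ hn2 hdisj'
          have hadd : PySem.Set.add (pvEmit (pvG1 F sp.val) ++ pvEmit (pvG2 F sp.val)) sp.val
              = pvEmit (pvG1 F sp.val) ++ pvEmit (pvG2 F sp.val) ++ [sp.val] :=
            PySem.Set.add_of_not_mem (by
              intro hx
              rcases List.mem_append.1 hx with hx | hx
              · exact hsp1 hx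
              · exact hsp2 hx)
          have hemit : pvEmit F = pvEmit (pvG1 F sp.val) ++ pvEmit (pvG2 F sp.val) ++ [sp.val] := by
            rw [pv_emit_step hb, hres]
          refine ⟨?_, ?_, ?_⟩
          · rw [hemit]
            show some (PySem.Set.add (PySem.Set.union (pvEmit (pvG1 F sp.val))
              (pvEmit (pvG2 F sp.val))) sp.val) = _
            rw [hunion, hadd]
          · rw [hemit]
            refine List.Nodup.append (List.Nodup.append hn1 hn2 ?_) (List.nodup_singleton _) ?_
            · intro x hx1 hx2
              exact hdisj' x hx2 hx1
            · intro x hx hxs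
              rcases List.mem_singleton.1 hxs with rfl
              rcases List.mem_append.1 hx with hx | hx
              · exact hsp1 hx
              · exact hsp2 hx
          · intro x
            rw [hemit]
            simp only [List.mem_append, List.mem_singleton]
            constructor
            · rintro ((hx | hx) | rfl)
              · rcases pv_occurs_G1.1 ((he1 x).1 hx) with ⟨_, f, hf, _, hxf⟩
                exact ⟨f, hf, hxf⟩
              · rcases pv_occurs_G2.1 ((he2 x).1 hx) with ⟨f, hf, _, hxf⟩
                exact ⟨f, hf, hxf⟩
              · exact pv_mem_pvU.1 sp.property
            · rintro ⟨f, hf, hxf⟩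
              by_cases hxc : x = sp.val
              · exact Or.inr hxc
              · by_cases hcf : sp.val ∈ f
                · exact Or.inl (Or.inl ((he1 x).2 (pv_occurs_G1.2 ⟨hxc, f, hf, hcf, hxf⟩)))
                · exact Or.inl (Or.inr ((he2 x).2 (pv_occurs_G2.2 ⟨f, hf, hcf, hxf⟩)))
      · refine ⟨fun hv' => absurd hv' hv, fun _ => ?_⟩
        rw [pv_build_step hb]
        apply List.findSome?_eq_none_iff.2
        intro sp hsp
        rcases h1 : build (pvG1 F sp.val) with _ | av
        · rfl
        rcases h2 : build (pvG2 F sp.val) with _ | bv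
        · rfl
        have hv1 : pvValid (pvG1 F sp.val) := by
          by_contra hq
          rw [(ih _ (hmeas1 sp.val sp.property)).2 hq] at h1
          cases h1
        have hv2 : pvValid (pvG2 F sp.val) := by
          by_contra hq
          rw [(ih _ (hmeas2 sp.val sp.property)).2 hq] at h2
          cases h2
        obtain ⟨hb1, hn1, he1⟩ := (ih _ (hmeas1 sp.val sp.property)).1 hv1
        obtain ⟨hb2, hn2, he2⟩ := (ih _ (hmeas2 sp.val sp.property)).1 hv2
        have hav : av = pvEmit (pvG1 F sp.val) := by
          rw [h1] at hb1
          exact Option.some.inj hb1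
        have hbv : bv = pvEmit (pvG2 F sp.val) := by
          rw [h2] at hb2
          exact Option.some.inj hb2
        show (if PySem.Set.inter av bv = [] then
            some (PySem.Set.add (PySem.Set.union av bv) sp.val) else none) = none
        by_cases hint : PySem.Set.inter av bv = []
        · exfalso
          apply hv
          have hdisj : ∀ x, ¬(pvOccurs (pvG1 F sp.val) x ∧ pvOccurs (pvG2 F sp.val) x) := by
            rintro x ⟨o1, o2⟩
            have hx : x ∈ PySem.Set.inter av bv :=
              List.mem_filter.2 ⟨hav ▸ (he1 x).2 o1, (List.contains_iff_mem).2 (hbv ▸ (he2 x).2 o2)⟩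
            rw [hint] at hx
            simp at hx
          exact ⟨pv_nodup_of_parts hv1.1 hv2.1, pv_lam_of_parts hv1.2 hv2.2 hdisj⟩
        · rw [if_neg hint]

-- build_alt unfolded over the named proof-side pieces
theorem pv_alt_eq (F : List (List String)) :
    build_alt F = if pvRowDup F [] then none
      else if pvLaminarOk F (pvU F) then some (PySem.Set.ofList (pvEmit F)) else none := by
  unfold build_alt
  rw [pv_chars_eq, pv_run_emit]

theorem pv_build_eq_alt (F : List (List String)) : build F = build_alt F := by
  have h := pv_main (pvMeasure F) F (le_refl _)
  rw [pv_alt_eq]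
  by_cases hv : pvValid F
  · obtain ⟨hbuild, hnodup, _⟩ := h.1 hv
    rw [if_neg (by rw [pv_rowDup_false_iff.2 hv.1]; simp),
      if_pos (pv_laminarOk_iff.2 hv.2), hbuild,
      PySem.Set.ofList_eq_self_of_nodup (pvEmit F) hnodup]
  · rw [h.2 hv]
    by_cases hdup : pvRowDup F [] = true
    · rw [if_pos hdup]
    · rw [if_neg hdup]
      have hnd : pvNoDup F := pv_rowDup_false_iff.1 (by simpa using hdup)
      rw [if_neg (fun hl => hv ⟨hnd, pv_laminarOk_iff.1 hl⟩)]

-- ===== VERDICT (by name: the statement is the Claim_ definition above) =====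
theorem build_spec : Claim_equal_build := by
  intro F _
  unfold Spec_build
  exact pv_build_eq_alt F
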